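-- pv_equiv track=rewrite | github.com/Dalbukerk/HTools | mod/mod/addends.py | scan_format
-- ===== SOURCE A (Python) =====
-- def scan_format(form):
--     size_f = len(form)
--     if (size_f%2) != 0:
--         return 1
--     for i in range(0,size_f,2):
--         if form[i] != "%" or (form[i+1] not in ["p", "0", "m", "M", "d"]):
--             return 1
--     if count(form, "l") > 1:
--         return 1
--     if count(form, "e") > 1:
--         return 1
--     return 0
--
-- def count(string, char):
--     q = 0
--     for i in string:
--         if i == char:
--             q+=1
--     return q
-- ===== SOURCE B (Python) =====
-- def scan_format(form):
--     while form.startswith('%') and len(form) >= 2 and form[1] in 'p0mMd':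
--         form = form[2:]
--     return 0 if form == '' else 1
-- ===== Notes on version B (the rewrite author's own statement) =====
-- stated objective: simpler
-- what changed: B replaces A's index-based scan over range(0,len,2) plus two separate character-count passes (which can never fire) with a single greedy loop that strips a leading valid percent-pair (a percent sign followed by one of the five format letters) until none remains and checks the remainder is empty.
import Mathlib
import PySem

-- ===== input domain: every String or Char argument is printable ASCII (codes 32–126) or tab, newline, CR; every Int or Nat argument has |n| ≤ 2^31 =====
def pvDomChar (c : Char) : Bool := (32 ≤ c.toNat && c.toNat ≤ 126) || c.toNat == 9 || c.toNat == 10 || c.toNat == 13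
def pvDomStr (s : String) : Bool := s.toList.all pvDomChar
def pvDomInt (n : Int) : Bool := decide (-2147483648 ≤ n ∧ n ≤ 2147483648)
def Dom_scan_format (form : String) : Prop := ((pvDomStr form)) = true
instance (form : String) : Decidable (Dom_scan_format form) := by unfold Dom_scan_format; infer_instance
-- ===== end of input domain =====

-- B replaces A's indexed scan (plus its dead count checks) with greedy pair-stripping
-- from the front of the string; objective: simpler. Equivalence is about the return value.

-- ===== PORT A =====
-- helper 'count' of A (q = 0; for i in string: if i == char: q += 1)
def pycount (s : List Char) (char : Char) : Int :=
  s.foldl (fun q i => if i = char then q + 1 else q) 0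

-- the for-loop over range(0, size_f, 2); early 'return 1' becomes result 'false'.
-- Inside scan_format the indices i, i+1 are always in range (even length), so the
-- default of pyGetD is never used.
def scanLoop (cs : List Char) : List Int → Bool
  | [] => true
  | i :: rest =>
      if PySem.List.pyGetD cs i ' ' ≠ '%' ∨
         PySem.List.pyGetD cs (i + 1) ' ' ∉ ['p', '0', 'm', 'M', 'd'] then false
      else scanLoop cs rest

def scan_format (form : String) : Int :=
  if PySem.Int.mod (PySem.Str.len form) 2 ≠ 0 then 1
  else if scanLoop form.toList (PySem.List.pyRange 0 (PySem.Str.len form) 2) = false then 1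
  else if pycount form.toList 'l' > 1 then 1
  else if pycount form.toList 'e' > 1 then 1
  else 0

-- ===== PORT B =====
-- the while-loop of B: strip a leading percent-pair (percent sign followed by one of p,0,m,M,d) while possible
def stripPairs : List Char → List Char
  | c1 :: c2 :: rest =>
      if c1 = '%' && (c2 = 'p' || c2 = '0' || c2 = 'm' || c2 = 'M' || c2 = 'd') then
        stripPairs rest
      else c1 :: c2 :: rest
  | cs => cs

def scan_format_alt (form : String) : Int :=
  if stripPairs form.toList = [] then 0 else 1

-- ===== PRECONDITION & SPEC =====
def Spec_scan_format (form : String) (out : Int) : Prop := out = scan_format_alt form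
instance (form : String) (out : Int) : Decidable (Spec_scan_format form out) := by unfold Spec_scan_format; infer_instance

-- ===== CLAIM (what is proved, stated in full; the proofs are below) =====
def Claim_equal_scan_format : Prop := ∀ (form : String), Dom_scan_format form → Spec_scan_format form (scan_format form)

-- ===== LEMMAS AND PROOFS =====

-- shifting all indices by 2 = dropping the first two list elements
lemma scanLoop_shift (x y : Char) (rest : List Char) (idxs : List Int)
    (h : ∀ i ∈ idxs, 0 ≤ i) :
    scanLoop (x :: y :: rest) (idxs.map (· + 2)) = scanLoop rest idxs := by
  induction idxs with
  | nil => rfl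
  | cons i tl ih =>
    have hi : 0 ≤ i := h i (by simp)
    have h2 : (0:Int) ≤ i + 1 := by omega
    have e1 : PySem.List.pyGetD (x :: y :: rest) (i + 2) ' ' = PySem.List.pyGetD rest i ' ' := by
      rw [PySem.List.pyGetD_of_nonneg _ _ (by omega), PySem.List.pyGetD_of_nonneg _ _ hi]
      have : (i + 2).toNat = i.toNat + 2 := by omega
      simp [this]
    have e2 : PySem.List.pyGetD (x :: y :: rest) (i + 2 + 1) ' ' = PySem.List.pyGetD rest (i + 1) ' ' := by
      rw [PySem.List.pyGetD_of_nonneg _ _ (by omega), PySem.List.pyGetD_of_nonneg _ _ h2]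
      have : (i + 2 + 1).toNat = (i + 1).toNat + 2 := by omega
      simp [this]
    simp only [List.map_cons, scanLoop, e1, e2]
    split
    · rfl
    · exact ih (fun j hj => h j (by simp [hj]))

-- range(0, n, 2) for 0 ≤ n, written as a map over List.range
lemma pyRange_step2 (n : Nat) :
    PySem.List.pyRange 0 (n : Int) 2 =
      (List.range ((n + 1) / 2)).map (fun k => ((2 * k : Nat) : Int)) := by
  rw [PySem.List.pyRange_of_pos _ _ (by norm_num)]
  have he : (if (0:Int) < n then (((n:Int) - 0 + 2 - 1) / 2).toNat else 0) = (n + 1) / 2 := by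
    split <;> omega
  rw [he]
  exact List.map_congr_left (fun k _ => by push_cast; ring)

-- core characterisation: the even-length test together with A's scan succeeds
-- exactly when B's pair-stripping consumes the whole string
lemma strip_nil_iff (cs : List Char) :
    stripPairs cs = [] ↔
      (cs.length % 2 = 0 ∧ scanLoop cs (PySem.List.pyRange 0 (cs.length : Int) 2) = true) := by
  induction cs using stripPairs.induct with
  | case1 c1 c2 rest hcond ih =>
    -- pair accepted
    rw [stripPairs, if_pos hcond, ih]
    have hlen : (c1 :: c2 :: rest).length = rest.length + 2 := by simp
    have hm : (rest.length + 2 + 1) / 2 = (rest.length + 1) / 2 + 1 := by omega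
    rw [hlen]
    simp only [pyRange_step2]
    rw [hm, List.range_succ_eq_map, List.map_cons, List.map_map]
    have hmap : (List.map ((fun k => ((2 * k : Nat) : Int)) ∘ Nat.succ) (List.range ((rest.length + 1) / 2)))
        = (List.map (fun k => ((2 * k : Nat) : Int)) (List.range ((rest.length + 1) / 2))).map (· + 2) := by
      rw [List.map_map]; exact List.map_congr_left (fun k _ => by simp [Nat.succ_eq_add_one]; ring)
    rw [hmap]
    simp only [Nat.mul_zero, Nat.cast_zero, scanLoop]
    have hx : PySem.List.pyGetD (c1 :: c2 :: rest) 0 ' ' = c1 := PySem.List.pyGetD_zero_cons _ _ _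
    have hy : PySem.List.pyGetD (c1 :: c2 :: rest) (0 + 1) ' ' = c2 := by
      norm_num [PySem.List.pyGetD_ofNat' (c1 :: c2 :: rest) 1 ' ']
    rw [hx, hy]
    have hc1 : c1 = '%' := by
      rcases Bool.and_eq_true_iff.mp hcond with ⟨h1, _⟩; exact decide_eq_true_eq.mp h1
    have hc2 : c2 ∈ ['p', '0', 'm', 'M', 'd'] := by
      rcases Bool.and_eq_true_iff.mp hcond with ⟨_, h2⟩
      simp only [Bool.or_eq_true, decide_eq_true_eq] at h2
      simp only [List.mem_cons, List.not_mem_nil, or_false]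
      tauto
    rw [if_neg (by simp [hc1, hc2])]
    rw [scanLoop_shift _ _ _ _ (fun i hi => by
      rcases List.mem_map.mp hi with ⟨k, _, hk⟩; omega)]
    constructor
    · rintro ⟨h1, h2⟩; exact ⟨by omega, h2⟩
    · rintro ⟨h1, h2⟩; exact ⟨by omega, h2⟩
  | case2 c1 c2 rest hcond =>
    -- bad leading pair: stripping stops with a nonempty list, and A's scan fails at index 0
    rw [stripPairs, if_neg hcond]
    constructor
    · intro h; exact absurd h (by simp)
    · rintro ⟨h1, h2⟩
      exfalso
      have hlen : (c1 :: c2 :: rest).length = rest.length + 2 := by simp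
      rw [hlen, pyRange_step2] at h2
      have hm : (rest.length + 2 + 1) / 2 = (rest.length + 1) / 2 + 1 := by omega
      rw [hm, List.range_succ_eq_map, List.map_cons] at h2
      simp only [Nat.mul_zero, Nat.cast_zero, scanLoop] at h2
      have hx : PySem.List.pyGetD (c1 :: c2 :: rest) 0 ' ' = c1 := PySem.List.pyGetD_zero_cons _ _ _
      have hy : PySem.List.pyGetD (c1 :: c2 :: rest) (0 + 1) ' ' = c2 := by
        norm_num [PySem.List.pyGetD_ofNat' (c1 :: c2 :: rest) 1 ' ']
      rw [hx, hy] at h2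
      have hbad : c1 ≠ '%' ∨ c2 ∉ ['p', '0', 'm', 'M', 'd'] := by
        by_contra hc
        apply hcond
        simp only [not_or, not_not] at hc
        rcases hc with ⟨e1, e2⟩
        simp only [List.mem_cons, List.not_mem_nil, or_false] at e2
        simp only [Bool.and_eq_true_iff, Bool.or_eq_true, decide_eq_true_eq]
        exact ⟨e1, by tauto⟩
      rw [if_pos hbad] at h2
      exact Bool.false_ne_true h2
  | case3 cs hno =>
    -- length 0 or 1
    match cs, hno with
    | [], _ => simp [stripPairs, PySem.List.pyRange, scanLoop]
    | [c], _ =>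
      simp only [stripPairs, List.length_cons, List.length_nil]
      constructor
      · intro h; exact absurd h (by simp)
      · rintro ⟨h1, _⟩; omega
    | c1 :: c2 :: rest, hno => exact (hno c1 c2 rest rfl).elim

-- a fully stripped string contains no character outside {'%','p','0','m','M','d'}
lemma strip_nil_mem (cs : List Char) (h : stripPairs cs = [])
    (c : Char) (hc : c ∈ cs) : c ∈ ['%', 'p', '0', 'm', 'M', 'd'] := by
  induction cs using stripPairs.induct with
  | case1 c1 c2 rest hcond ih =>
    rw [stripPairs, if_pos hcond] at h
    rcases Bool.and_eq_true_iff.mp hcond with ⟨h1, h2⟩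
    simp only [Bool.or_eq_true, decide_eq_true_eq] at h1 h2
    simp only [List.mem_cons] at hc
    rcases hc with rfl | rfl | hc
    · simp [h1]
    · simp only [List.mem_cons, List.not_mem_nil, or_false]
      tauto
    · exact ih h hc
  | case2 c1 c2 rest hcond =>
    rw [stripPairs, if_neg hcond] at h
    exact absurd h (by simp)
  | case3 cs hno =>
    match cs, hc, h, hno with
    | [], hc, _, _ => simp at hc
    | [c'], hc, h, _ =>
      simp only [stripPairs] at h
      exact absurd h (by simp)
    | c1 :: c2 :: rest, _, _, hno => exact (hno c1 c2 rest rfl).elim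
  
lemma pycount_zero_of_strip_nil (cs : List Char) (h : stripPairs cs = [])
    (c : Char) (hc : c ∉ (['%', 'p', '0', 'm', 'M', 'd'] : List Char)) :
    pycount cs c = 0 := by
  unfold pycount
  have hfun : (fun (q : Int) (i : Char) => if i = c then q + 1 else q)
      = (fun (q : Int) (i : Char) => if decide (i = c) = true then q + 1 else q) := by
    funext q i; simp
  rw [hfun, PySem.List.foldl_count_if (fun i => decide (i = c)) cs 0]
  have : List.countP (fun i => decide (i = c)) cs = 0 := by
    rw [List.countP_eq_zero]
    intro a ha
    simp only [decide_eq_true_eq]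
    intro e
    exact hc (e ▸ strip_nil_mem cs h a ha)
  simp [this]

-- ===== VERDICT (by name: the statement is the Claim_ definition above) =====
theorem scan_format_spec : Claim_equal_scan_format := by
  intro form _
  unfold Spec_scan_format scan_format scan_format_alt
  rw [PySem.Str.len_eq, PySem.Int.mod_eq_emod_of_pos (by norm_num)]
  by_cases hstrip : stripPairs form.toList = []
  · have hch := (strip_nil_iff form.toList).mp hstrip
    have hpar := hch.1
    rw [if_neg (by omega : ¬ ((form.toList.length : Int) % 2 ≠ 0))]
    rw [if_neg (by
      have h2 := hch.2
      simp only [String.length_toList] at h2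
      simp [h2])]
    rw [if_neg (by
      have := pycount_zero_of_strip_nil form.toList hstrip 'l' (by decide)
      omega)]
    rw [if_neg (by
      have := pycount_zero_of_strip_nil form.toList hstrip 'e' (by decide)
      omega)]
    rw [if_pos hstrip]
  · rw [if_neg hstrip]
    by_cases hpar : form.toList.length % 2 = 0
    · have hloop : ¬ scanLoop form.toList (PySem.List.pyRange 0 (form.toList.length : Int) 2) = true := by
        intro hl
        exact hstrip ((strip_nil_iff form.toList).mpr ⟨hpar, hl⟩)
      rw [if_neg (by omega : ¬ ((form.toList.length : Int) % 2 ≠ 0))]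
      rw [if_pos (by
        simp only [String.length_toList] at hloop
        simpa using hloop)]
    · rw [if_pos (by omega : ((form.toList.length : Int) % 2 ≠ 0))]
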